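-- pv_equiv track=rewrite | github.com/lenaireland/Lemmings | lemmings.py | furthest
-- ===== SOURCE A (Python) =====
-- def furthest(num_holes, cafes):
--     """Find longest distance between a hole and a cafe."""
--
--     max_distance = 0
--
--     for i in range(num_holes):
--         min_distance = cafes[0] - i
--         if min_distance < 0:
--             min_distance = -min_distance
--         for cafe in cafes:
--
--             distance = i - cafe
--             if distance < 0:
--                 distance = distance * -1
--
--             if distance < min_distance:
--                 min_distance = distance
--
--         if min_distance > max_distance:
--             max_distance = min_distance
--
--     return max_distance
-- ===== SOURCE B (Python) =====
-- def furthest(num_holes, cafes):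
--     """Find longest distance between a hole and a cafe."""
--     s = sorted(cafes)
--     max_distance = 0
--     j = 0
--     for i in range(num_holes):
--         while j < len(s) and s[j] < i:
--             j += 1
--         if j == 0:
--             d = s[0] - i
--         elif j == len(s):
--             d = i - s[-1]
--         else:
--             d = min(i - s[j - 1], s[j] - i)
--         if d > max_distance:
--             max_distance = d
--     return max_distance
-- ===== Notes on version B (the rewrite author's own statement) =====
-- stated objective: faster
-- what changed: B sorts the cafes once and sweeps a single monotone pointer over the holes, taking the nearest cafe as one of the two sorted neighbours of each hole, instead of A's inner scan of every cafe for every hole.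
import Mathlib
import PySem

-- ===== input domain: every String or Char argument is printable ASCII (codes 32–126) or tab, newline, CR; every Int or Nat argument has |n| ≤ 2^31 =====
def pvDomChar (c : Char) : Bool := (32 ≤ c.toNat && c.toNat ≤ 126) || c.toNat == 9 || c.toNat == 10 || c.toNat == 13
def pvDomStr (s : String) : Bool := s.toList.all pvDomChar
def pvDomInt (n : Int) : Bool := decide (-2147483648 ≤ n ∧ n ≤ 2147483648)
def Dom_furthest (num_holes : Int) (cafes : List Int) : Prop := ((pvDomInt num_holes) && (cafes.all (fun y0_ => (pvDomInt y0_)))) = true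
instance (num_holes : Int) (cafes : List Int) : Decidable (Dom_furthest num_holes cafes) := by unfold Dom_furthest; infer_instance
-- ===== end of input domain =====

-- B sorts the cafes once and sweeps one monotone pointer across the holes instead of
-- rescanning every cafe for every hole (A's nested loops).

-- ===== PORT A =====
def furthest (num_holes : Int) (cafes : List Int) : Int :=
  (PySem.List.pyRange 0 num_holes).foldl (fun max_distance i =>
    let md0 := (PySem.List.pyGet? cafes 0).getD 0 - i   -- cafes[0]; IndexError on [] is outside Pre_
    let md0 := if md0 < 0 then -md0 else md0
    let min_distance := cafes.foldl (fun min_distance cafe =>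
      let distance := i - cafe
      let distance := if distance < 0 then distance * -1 else distance
      if distance < min_distance then distance else min_distance) md0
    if min_distance > max_distance then min_distance else max_distance) 0

-- ===== PORT B =====
-- the `while j < len(s) and s[j] < i: j += 1` loop of Source B
def bAdvance (s : List Int) (i : Int) (j : Nat) : Nat :=
  if h : j < s.length then
    if s.getD j 0 < i then bAdvance s i (j + 1) else j
  else j
termination_by s.length - j

def furthest_alt (num_holes : Int) (cafes : List Int) : Int :=
  let s := PySem.List.sorted cafes (fun x => x)
  ((PySem.List.pyRange 0 num_holes).foldl (fun (st : Nat × Int) i =>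
    let j := bAdvance s i st.1
    let d :=
      if j = 0 then s.getD 0 0 - i                       -- s[0]; IndexError on [] is outside Pre_
      else if j = s.length then i - s.getD (s.length - 1) 0
      else min (i - s.getD (j - 1) 0) (s.getD j 0 - i)
    (j, if d > st.2 then d else st.2)) (0, 0)).2

-- ===== PRECONDITION & SPEC =====
-- Pre_ excludes exactly the inputs on which Python A raises IndexError: empty cafes with num_holes > 0.
def Pre_furthest (num_holes : Int) (cafes : List Int) : Prop := cafes ≠ [] ∨ num_holes ≤ 0
instance (num_holes : Int) (cafes : List Int) : Decidable (Pre_furthest num_holes cafes) := by unfold Pre_furthest; infer_instance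
def pvWitness_furthest : Int × List Int := (5, [1, 7, -2])

def Spec_furthest (num_holes : Int) (cafes : List Int) (out : Int) : Prop := out = furthest_alt num_holes cafes
instance (num_holes : Int) (cafes : List Int) (out : Int) : Decidable (Spec_furthest num_holes cafes out) := by unfold Spec_furthest; infer_instance

-- ===== CLAIM (what is proved, stated in full; the proofs are below) =====
def Claim_equal_furthest : Prop := ∀ (num_holes : Int) (cafes : List Int), Dom_furthest num_holes cafes → Pre_furthest num_holes cafes → Spec_furthest num_holes cafes (furthest num_holes cafes)

-- ===== LEMMAS AND PROOFS =====

-- the mathematical nearest-cafe distance of hole i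
def dmin (i : Int) (cs : List Int) : Int := ((cs.map (fun c => |i - c|)).min?).getD 0

-- number of cafes (in the sorted list) strictly left of hole i
def cnt (s : List Int) (i : Int) : Nat := s.countP (fun c => decide (c < i))

-- the common reference fold: max over holes of the nearest-cafe distance
def refFold (cs : List Int) (n : Int) : Int :=
  (PySem.List.pyRange 0 n).foldl (fun M i => max M (dmin i cs)) 0

lemma pyRange_nonpos {n : Int} (h : n ≤ 0) : PySem.List.pyRange 0 n = [] := by
  simp [PySem.List.pyRange, show ¬(0:Int) < n from by omega]

lemma cnt_le_length (s : List Int) (i : Int) : cnt s i ≤ s.length := by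
  unfold cnt; exact List.countP_le_length

lemma cnt_mono (s : List Int) {i i' : Int} (h : i ≤ i') : cnt s i ≤ cnt s i' := by
  unfold cnt
  exact List.countP_mono_left (fun x _ hx => by simp at hx ⊢; omega)

-- in a sorted list, the elements < i are exactly the first (cnt s i)
lemma sorted_lt_iff_lt_cnt (s : List Int) (hs : s.Pairwise (· ≤ ·)) (i : Int)
    (k : Nat) (hk : k < s.length) : s[k] < i ↔ k < cnt s i := by
  induction s generalizing k with
  | nil => simp at hk
  | cons a t ih =>
    have hat : ∀ x ∈ t, a ≤ x := fun x hx => (List.pairwise_cons.mp hs).1 x hx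
    have hts : t.Pairwise (· ≤ ·) := (List.pairwise_cons.mp hs).2
    cases k with
    | zero =>
      simp only [List.getElem_cons_zero]
      unfold cnt
      rw [List.countP_cons]
      by_cases hai : a < i
      · simp [hai]
      · have h0 : t.countP (fun c => decide (c < i)) = 0 :=
          List.countP_eq_zero.mpr (fun x hx => by
            have := hat x hx; simp only [decide_eq_true_eq]; omega)
        simp [hai, h0]
    | succ k' =>
      simp only [List.getElem_cons_succ]
      have hk' : k' < t.length := by simpa using hk
      rw [ih hts k' hk']
      show k' < cnt t i ↔ _
      unfold cnt
      rw [List.countP_cons]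
      by_cases hai : a < i
      · simp [hai]
      · have h0 : t.countP (fun c => decide (c < i)) = 0 :=
          List.countP_eq_zero.mpr (fun x hx => by
            have := hat x hx; simp only [decide_eq_true_eq]; omega)
        simp [hai, h0]

lemma bAdvance_eq_cnt (s : List Int) (hs : s.Pairwise (· ≤ ·)) (i : Int)
    (j : Nat) (hj : j ≤ cnt s i) : bAdvance s i j = cnt s i := by
  rw [bAdvance]
  rcases lt_or_eq_of_le hj with hlt | heq
  · have hjlen : j < s.length := lt_of_lt_of_le hlt (cnt_le_length s i)
    have hsj : s[j] < i := (sorted_lt_iff_lt_cnt s hs i j hjlen).mpr hlt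
    rw [dif_pos hjlen, List.getD_eq_getElem s 0 hjlen, if_pos hsj]
    exact bAdvance_eq_cnt s hs i (j + 1) hlt
  · by_cases hjlen : j < s.length
    · have hsj : ¬ s[j] < i := by rw [sorted_lt_iff_lt_cnt s hs i j hjlen]; omega
      rw [dif_pos hjlen, List.getD_eq_getElem s 0 hjlen, if_neg hsj]
      exact heq
    · rw [dif_neg hjlen]
      exact heq
termination_by s.length - j

-- A's inner loop computes dmin
lemma inner_eq_dmin (i c0 : Int) (cs : List Int) :
    ((c0 :: cs).foldl (fun m c =>
      let distance := i - c
      let distance := if distance < 0 then distance * -1 else distance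
      if distance < m then distance else m) (if c0 - i < 0 then -(c0 - i) else c0 - i)) = dmin i (c0 :: cs) := by
  have hinit : (if c0 - i < 0 then -(c0 - i) else c0 - i) = |i - c0| := by
    rw [Int.abs_eq_natAbs]; split_ifs <;> omega
  have hstep : ∀ (m c : Int), (fun m c =>
      let distance := i - c
      let distance := if distance < 0 then distance * -1 else distance
      if distance < m then distance else m) m c = min m |i - c| := by
    intro m c
    simp only [Int.abs_eq_natAbs, min_def]
    split_ifs <;> omega
  rw [PySem.List.foldl_congr_mem _ _ (fun m c => min m |i - c|) _ (fun acc x _ => hstep acc x)]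
  rw [hinit]
  unfold dmin
  rw [List.map_cons, List.min?_cons']
  simp only [Option.getD_some]
  rw [List.foldl_cons, min_self, List.foldl_map]

lemma dmin_perm (i : Int) {s cs : List Int} (h : s.Perm cs) :
    dmin i s = dmin i cs := by
  unfold dmin
  have hperm : (s.map (fun c => |i - c|)).Perm (cs.map (fun c => |i - c|)) := h.map _
  rcases hmin : (cs.map (fun c => |i - c|)).min? with _ | a
  · rw [List.min?_eq_none_iff] at hmin
    have h2 : s.map (fun c => |i - c|) = [] := List.Perm.eq_nil (hmin ▸ hperm)
    rw [h2]
    rfl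
  · rw [List.min?_eq_some_iff] at hmin
    rw [List.min?_eq_some_iff.mpr ⟨hperm.mem_iff.mpr hmin.1, fun b hb => hmin.2 b (hperm.mem_iff.mp hb)⟩]

-- the two-neighbour candidate at pointer position cnt s i is the nearest distance
lemma branch_eq_dmin (s : List Int) (hs : s.Pairwise (· ≤ ·)) (hne : s ≠ []) (i : Int) :
    (if cnt s i = 0 then s.getD 0 0 - i
     else if cnt s i = s.length then i - s.getD (s.length - 1) 0
     else min (i - s.getD (cnt s i - 1) 0) (s.getD (cnt s i) 0 - i)) = dmin i s := by
  have hlen : 0 < s.length := List.length_pos_of_ne_nil hne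
  have hiff : ∀ k (hk : k < s.length), s[k] < i ↔ k < cnt s i := sorted_lt_iff_lt_cnt s hs i
  have hmono : ∀ p q, (hpq : p ≤ q) → (hq : q < s.length) → s[p]'(lt_of_le_of_lt hpq hq) ≤ s[q] := by
    intro p q hpq hq
    rcases eq_or_lt_of_le hpq with rfl | hlt
    · exact le_refl _
    · exact List.pairwise_iff_getElem.mp hs p q _ hq hlt
  have hcle := cnt_le_length s i
  by_cases h0 : cnt s i = 0
  · have hkey : (s.map (fun c => |i - c|)).min? = some (s[0] - i) := by
      rw [List.min?_eq_some_iff]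
      constructor
      · refine List.mem_map.mpr ⟨s[0], List.getElem_mem hlen, ?_⟩
        have hn : ¬ s[0] < i := by rw [hiff 0 hlen]; omega
        rw [Int.abs_eq_natAbs]; omega
      · intro b hb
        obtain ⟨x, hx, rfl⟩ := List.mem_map.mp hb
        obtain ⟨k, hk, rfl⟩ := List.mem_iff_getElem.mp hx
        have h1 : ¬ s[k] < i := by rw [hiff k hk]; omega
        have h2 : s[0] ≤ s[k] := hmono 0 k (Nat.zero_le _) hk
        rw [Int.abs_eq_natAbs]; omega
    unfold dmin
    rw [hkey, if_pos h0, List.getD_eq_getElem s 0 hlen]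
    rfl
  · by_cases hL : cnt s i = s.length
    · have hl1 : s.length - 1 < s.length := by omega
      have hkey : (s.map (fun c => |i - c|)).min? = some (i - s[s.length - 1]) := by
        rw [List.min?_eq_some_iff]
        constructor
        · refine List.mem_map.mpr ⟨s[s.length - 1], List.getElem_mem hl1, ?_⟩
          have hn : s[s.length - 1] < i := by rw [hiff _ hl1]; omega
          rw [Int.abs_eq_natAbs]; omega
        · intro b hb
          obtain ⟨x, hx, rfl⟩ := List.mem_map.mp hb
          obtain ⟨k, hk, rfl⟩ := List.mem_iff_getElem.mp hx
          have h1 : s[k] < i := by rw [hiff k hk]; omega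
          have h2 : s[k] ≤ s[s.length - 1] := hmono k (s.length - 1) (by omega) hl1
          rw [Int.abs_eq_natAbs]; omega
      unfold dmin
      rw [hkey, if_neg h0, if_pos hL, List.getD_eq_getElem s 0 hl1]
      rfl
    · have hcl : cnt s i < s.length := by omega
      have hc1 : cnt s i - 1 < s.length := by omega
      have hlo : s[cnt s i - 1] < i := by rw [hiff _ hc1]; omega
      have hhi : ¬ s[cnt s i] < i := by rw [hiff _ hcl]; omega
      have hkey : (s.map (fun c => |i - c|)).min? =
          some (min (i - s[cnt s i - 1]) (s[cnt s i] - i)) := by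
        rw [List.min?_eq_some_iff]
        constructor
        · rcases le_total (i - s[cnt s i - 1]) (s[cnt s i] - i) with hmm | hmm
          · rw [min_eq_left hmm]
            refine List.mem_map.mpr ⟨s[cnt s i - 1], List.getElem_mem hc1, ?_⟩
            rw [Int.abs_eq_natAbs]; omega
          · rw [min_eq_right hmm]
            refine List.mem_map.mpr ⟨s[cnt s i], List.getElem_mem hcl, ?_⟩
            rw [Int.abs_eq_natAbs]; omega
        · intro b hb
          obtain ⟨x, hx, rfl⟩ := List.mem_map.mp hb
          obtain ⟨k, hk, rfl⟩ := List.mem_iff_getElem.mp hx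
          by_cases hkc : k < cnt s i
          · have h1 : s[k] < i := (hiff k hk).mpr hkc
            have h2 : s[k] ≤ s[cnt s i - 1] := hmono k (cnt s i - 1) (by omega) hc1
            have hm := min_le_left (i - s[cnt s i - 1]) (s[cnt s i] - i)
            rw [Int.abs_eq_natAbs]; omega
          · have h1 : ¬ s[k] < i := by rw [hiff k hk]; omega
            have h2 : s[cnt s i] ≤ s[k] := hmono (cnt s i) k (by omega) hk
            have hm := min_le_right (i - s[cnt s i - 1]) (s[cnt s i] - i)
            rw [Int.abs_eq_natAbs]; omega
      unfold dmin
      rw [hkey, if_neg h0, if_neg hL,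
        List.getD_eq_getElem s 0 hc1, List.getD_eq_getElem s 0 hcl]
      rfl

lemma furthest_eq_ref (n : Int) (cafes : List Int) (hne : cafes ≠ []) :
    furthest n cafes = refFold cafes n := by
  obtain ⟨c0, cs, rfl⟩ := List.exists_cons_of_ne_nil hne
  unfold furthest refFold
  refine PySem.List.foldl_congr_mem _ _ _ _ ?_
  intro M i _
  show (let md0 := (PySem.List.pyGet? (c0 :: cs) 0).getD 0 - i
        let md0 := if md0 < 0 then -md0 else md0
        let min_distance := (c0 :: cs).foldl (fun min_distance cafe =>
          let distance := i - cafe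
          let distance := if distance < 0 then distance * -1 else distance
          if distance < min_distance then distance else min_distance) md0
        if min_distance > M then min_distance else M) = max M (dmin i (c0 :: cs))
  have hget : (PySem.List.pyGet? (c0 :: cs) 0).getD 0 = c0 := by simp [pysem]
  simp only [hget]
  rw [inner_eq_dmin i c0 cs]
  rw [max_def]; split_ifs <;> omega

lemma furthest_alt_eq_ref (n : Int) (cafes : List Int) (hne : cafes ≠ []) :
    furthest_alt n cafes = refFold cafes n := by
  have hs : (PySem.List.sorted cafes (fun x => x)).Pairwise (· ≤ ·) := by
    simpa using PySem.List.sorted_pairwise cafes (fun x => x)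
  have hperm : (PySem.List.sorted cafes (fun x => x)).Perm cafes :=
    PySem.List.sorted_perm cafes (fun x => x) false
  have hsne : PySem.List.sorted cafes (fun x => x) ≠ [] := by
    rw [Ne, PySem.List.sorted_eq_nil_iff]; exact hne
  set s := PySem.List.sorted cafes (fun x => x) with hsdef
  -- the invariant over an initial segment of holes
  have main : ∀ m : Nat,
      (((List.range m).map (fun (k : Nat) => (k : Int))).foldl (fun (st : Nat × Int) i =>
        let j := bAdvance s i st.1
        let d :=
          if j = 0 then s.getD 0 0 - i
          else if j = s.length then i - s.getD (s.length - 1) 0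
          else min (i - s.getD (j - 1) 0) (s.getD j 0 - i)
        (j, if d > st.2 then d else st.2)) (0, 0)) =
      ((if m = 0 then 0 else cnt s ((m - 1 : Nat) : Int)),
        ((List.range m).map (fun (k : Nat) => (k : Int))).foldl (fun M i => max M (dmin i cafes)) 0) := by
    intro m
    induction m with
    | zero => rfl
    | succ m ih =>
      rw [List.range_succ, List.map_append, List.foldl_append, List.foldl_append, ih]
      simp only [List.map_cons, List.map_nil, List.foldl_cons, List.foldl_nil]
      have hjle : (if m = 0 then 0 else cnt s ((m - 1 : Nat) : Int)) ≤ cnt s (m : Int) := by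
        split_ifs with hm
        · exact Nat.zero_le _
        · exact cnt_mono s (by exact_mod_cast Nat.sub_le m 1)
      have hadv : bAdvance s (m : Int) (if m = 0 then 0 else cnt s ((m - 1 : Nat) : Int)) =
          cnt s (m : Int) := bAdvance_eq_cnt s hs (m : Int) _ hjle
      simp only [hadv]
      rw [branch_eq_dmin s hs hsne (m : Int)]
      have : (if m + 1 = 0 then 0 else cnt s ((m + 1 - 1 : Nat) : Int)) = cnt s (m : Int) := by
        simp
      rw [this, dmin_perm (m : Int) hperm]
      have : (if dmin (m : Int) cafes > (((List.range m).map (fun (k : Nat) => (k : Int))).foldl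
          (fun M i => max M (dmin i cafes)) 0) then dmin (m : Int) cafes
          else (((List.range m).map (fun (k : Nat) => (k : Int))).foldl (fun M i => max M (dmin i cafes)) 0)) =
          max (((List.range m).map (fun (k : Nat) => (k : Int))).foldl (fun M i => max M (dmin i cafes)) 0)
            (dmin (m : Int) cafes) := by
        rw [max_def]; split_ifs <;> omega
      rw [this]
  rcases (by omega : n ≤ 0 ∨ 0 < n) with hn | hn
  · unfold furthest_alt refFold
    rw [pyRange_nonpos hn]
    rfl
  · have hcast : n = ((n.toNat : Nat) : Int) := by omega
    unfold furthest_alt refFold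
    rw [hcast, PySem.List.pyRange_zero_natCast]
    show (((List.range n.toNat).map (fun (k : Nat) => (k : Int))).foldl (fun (st : Nat × Int) i =>
        let j := bAdvance s i st.1
        let d :=
          if j = 0 then s.getD 0 0 - i
          else if j = s.length then i - s.getD (s.length - 1) 0
          else min (i - s.getD (j - 1) 0) (s.getD j 0 - i)
        (j, if d > st.2 then d else st.2)) (0, 0)).2 =
      ((List.range n.toNat).map (fun (k : Nat) => (k : Int))).foldl (fun M i => max M (dmin i cafes)) 0
    rw [main n.toNat]

-- ===== VERDICT (by name: the statement is the Claim_ definition above) =====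
theorem furthest_spec : Claim_equal_furthest := by
  intro n cafes _ hpre
  unfold Spec_furthest
  rcases eq_or_ne cafes [] with rfl | hne
  · have hn : n ≤ 0 := by
      rcases hpre with h | h
      · exact absurd rfl h
      · exact h
    unfold furthest furthest_alt
    rw [pyRange_nonpos hn]
    rfl
  · rw [furthest_eq_ref n cafes hne, furthest_alt_eq_ref n cafes hne]
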